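-- pv_equiv track=rewrite | github.com/JeonCollin/cote | Python/백준-스위치 켜고 끄기.py | girl
-- ===== SOURCE A (Python) =====
-- def girl(student, switch_list):
--     #student: 성별2, 번호
--     N = len(switch_list)
--     col = student[1] - 1
--     i = 0
--     #여학생들은 번호 기준으로 좌우대칭인 곳까지 바꾼다
--     #일단 자기 자신 먼저 켜고 끈다
--     switch_list[ col ] = int(not switch_list[ col ])
--
--     #인덱스를 벗어나지 않게 한다
--     while(col-i >= 0 and col+i < N and switch_list[col-i] == switch_list[col+i]):
--         switch_list[col-i] = int(not switch_list[col-i])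
--         switch_list[col+i] = int(not switch_list[col+i])
--
--         i += 1
--
--     return switch_list
-- ===== SOURCE B (Python) =====
-- def _flip_pal(left, right):
--     # recursively flip the common prefix of the two lists (left is the reversed
--     # left neighbourhood, right the right neighbourhood of the center)
--     if left and right and left[0] == right[0]:
--         ltail, rtail = _flip_pal(left[1:], right[1:])
--         return [int(not left[0])] + ltail, [int(not right[0])] + rtail
--     return left, right
--
-- def girl(student, switch_list):
--     col = student[1] - 1
--     switch_list[col] = int(not switch_list[col])
--     if col >= 0:
--         new_left, new_right = _flip_pal(switch_list[:col][::-1], switch_list[col + 1:])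
--         switch_list[:col] = new_left[::-1]
--         switch_list[col + 1:] = new_right
--     return switch_list
-- ===== Notes on version B (the rewrite author's own statement) =====
-- stated objective: alternative
-- what changed: A's in-place index loop that walks outward from the center, comparing and toggling switch_list[col-i]/switch_list[col+i] as it goes, is replaced by a slice-based recursion: B extracts the reversed left slice and the right slice, recursively flips their common prefix (_flip_pal, structural recursion on the two lists, no index arithmetic), and splices the two new halves back with slice assignment.
import Mathlib
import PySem

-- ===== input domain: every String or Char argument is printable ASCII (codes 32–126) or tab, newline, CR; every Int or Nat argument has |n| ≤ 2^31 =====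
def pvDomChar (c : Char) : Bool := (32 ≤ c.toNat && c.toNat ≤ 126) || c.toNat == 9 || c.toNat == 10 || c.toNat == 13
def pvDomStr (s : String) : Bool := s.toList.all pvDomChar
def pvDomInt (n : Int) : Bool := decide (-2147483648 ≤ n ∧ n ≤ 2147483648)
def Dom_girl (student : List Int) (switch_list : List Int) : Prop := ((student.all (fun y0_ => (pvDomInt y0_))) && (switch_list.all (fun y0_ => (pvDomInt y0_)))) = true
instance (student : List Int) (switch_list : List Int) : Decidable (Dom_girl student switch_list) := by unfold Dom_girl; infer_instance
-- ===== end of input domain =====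

-- B replaces A's in-place index loop (walk outward from the center, compare and toggle as you go)
-- by a slice-based recursion: extract the reversed left slice and the right slice, recursively flip
-- their common prefix, and splice the halves back (objective: alternative decomposition).
-- A mutates switch_list in place (so does B, via slice assignment); the equivalence proved is about
-- the return value.

-- ===== PORT A =====
-- int(not x)
def pynot (x : Int) : Int := if x = 0 then 1 else 0

-- A's while loop: interleaved compare-and-toggle, i starting at 0
def girlLoop (col N : Int) (i : Int) (xs : List Int) : List Int :=
  if h : 0 ≤ col - i ∧ col + i < N ∧
      PySem.List.pyGetD xs (col - i) 0 = PySem.List.pyGetD xs (col + i) 0 then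
    let xs1 := PySem.List.pySetD xs (col - i) (pynot (PySem.List.pyGetD xs (col - i) 0))
    let xs2 := PySem.List.pySetD xs1 (col + i) (pynot (PySem.List.pyGetD xs1 (col + i) 0))
    girlLoop col N (i + 1) xs2
  else xs
termination_by (col + 1 - i).toNat
decreasing_by omega

def girl (student : List Int) (switch_list : List Int) : List Int :=
  let N : Int := switch_list.length
  let col : Int := PySem.List.pyGetD student 1 0 - 1
  let sl := PySem.List.pySetD switch_list col (pynot (PySem.List.pyGetD switch_list col 0))
  girlLoop col N 0 sl

-- ===== PORT B =====
-- _flip_pal: recursively flip the common prefix of the two lists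
def flipPal : List Int → List Int → List Int × List Int
  | a :: l, b :: r =>
    if a = b then
      let p := flipPal l r
      (pynot a :: p.1, pynot b :: p.2)
    else (a :: l, b :: r)
  | l, r => (l, r)

def girl_alt (student : List Int) (switch_list : List Int) : List Int :=
  let col : Int := PySem.List.pyGetD student 1 0 - 1
  let sl := PySem.List.pySetD switch_list col (pynot (PySem.List.pyGetD switch_list col 0))
  if 0 ≤ col then
    -- _flip_pal(switch_list[:col][::-1], switch_list[col+1:])
    let p := flipPal (PySem.List.slice sl none (some col)).reverse
                     (PySem.List.slice sl (some (col + 1)) none)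
    -- switch_list[:col] = new_left[::-1]  (list splice)
    let sl2 := p.1.reverse ++ PySem.List.slice sl (some col) none
    -- switch_list[col+1:] = new_right  (list splice)
    PySem.List.slice sl2 none (some (col + 1)) ++ p.2
  else sl

-- ===== PRECONDITION & SPEC =====
-- Pre_ excludes exactly the inputs where A raises: student shorter than 2 (IndexError on
-- student[1]) and a center index outside Python's index range (IndexError on the first toggle).
def Pre_girl (student : List Int) (switch_list : List Int) : Prop :=
  2 ≤ student.length ∧
  -(switch_list.length : Int) ≤ PySem.List.pyGetD student 1 0 - 1 ∧
  PySem.List.pyGetD student 1 0 - 1 < (switch_list.length : Int)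
instance (student : List Int) (switch_list : List Int) : Decidable (Pre_girl student switch_list) := by unfold Pre_girl; infer_instance

def pvWitness_girl : List Int × List Int := ([0, 2], [1, 0, 1])

def Spec_girl (student : List Int) (switch_list : List Int) (out : List Int) : Prop := out = girl_alt student switch_list
instance (student : List Int) (switch_list : List Int) (out : List Int) : Decidable (Spec_girl student switch_list out) := by unfold Spec_girl; infer_instance

-- ===== CLAIM (what is proved, stated in full; the proofs are below) =====
def Claim_equal_girl : Prop := ∀ (student : List Int) (switch_list : List Int), Dom_girl student switch_list → Pre_girl student switch_list → Spec_girl student switch_list (girl student switch_list)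

-- ===== LEMMAS AND PROOFS =====

theorem pynot3 (x : Int) : pynot (pynot (pynot x)) = pynot x := by
  by_cases h : x = 0 <;> simp [pynot, h]

theorem pyGetD_toNat (xs : List Int) (a : Int) (d : Int) (ha : 0 ≤ a) :
    PySem.List.pyGetD xs a d = xs.getD a.toNat d := by
  conv_lhs => rw [show a = ((a.toNat : Nat) : Int) from by omega]
  rw [PySem.List.pyGetD_natCast]

theorem pyGetD_set_ne (xs : List Int) (a b : Int) (v d : Int) (ha : 0 ≤ a) (hb : 0 ≤ b)
    (hne : a ≠ b) :
    PySem.List.pyGetD (PySem.List.pySetD xs a v) b d = PySem.List.pyGetD xs b d := by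
  rw [PySem.List.pySetD_of_nonneg _ _ ha, pyGetD_toNat _ _ _ hb, pyGetD_toNat _ _ _ hb]
  have : a.toNat ≠ b.toNat := by omega
  simp [List.getD, List.getElem?_set_ne this]

theorem pyGetD_set_self (xs : List Int) (a : Int) (v d : Int) (ha : 0 ≤ a)
    (hlen : a < (xs.length : Int)) :
    PySem.List.pyGetD (PySem.List.pySetD xs a v) a d = v := by
  rw [PySem.List.pySetD_of_nonneg _ _ ha, pyGetD_toNat _ _ _ ha]
  have : a.toNat < xs.length := by omega
  simp [List.getD, this]

-- proof-only helper: the palindromic radius of A's loop (used to characterise girlLoop)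
def girlScan (col N : Int) (xs : List Int) (r : Int) : Int :=
  if h : 0 ≤ col - (r + 1) ∧ col + (r + 1) < N ∧
      PySem.List.pyGetD xs (col - (r + 1)) 0 = PySem.List.pyGetD xs (col + (r + 1)) 0 then
    girlScan col N xs (r + 1)
  else r
termination_by (col - r).toNat
decreasing_by omega

-- proof-only helper: one symmetric toggle at distance i
def girlStep (col : Int) (acc : List Int) (i : Int) : List Int :=
  let a1 := PySem.List.pySetD acc (col - i) (pynot (PySem.List.pyGetD acc (col - i) 0))
  PySem.List.pySetD a1 (col + i) (pynot (PySem.List.pyGetD a1 (col + i) 0))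

-- proof-only helper: length of the common prefix of two lists
def prefixLen : List Int → List Int → Nat
  | a :: l, b :: r => if a = b then prefixLen l r + 1 else 0
  | _, _ => 0

theorem girlScan_ge (col N : Int) : ∀ (n : Nat) (r : Int) (xs : List Int),
    (col - r).toNat ≤ n → r ≤ girlScan col N xs r := by
  intro n
  induction n with
  | zero =>
    intro r xs hn
    rw [girlScan]
    split
    · next h => omega
    · omega
  | succ n ih =>
    intro r xs hn
    rw [girlScan]
    split
    · next h =>
      have := ih (r + 1) xs (by omega)
      omega
    · omega

theorem girlScan_congr (col N : Int) : ∀ (n : Nat) (r : Int) (xs ys : List Int),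
    (col - r).toNat ≤ n →
    (∀ k : Int, r < k → 0 ≤ col - k → col + k < N →
      PySem.List.pyGetD ys (col - k) 0 = PySem.List.pyGetD xs (col - k) 0 ∧
      PySem.List.pyGetD ys (col + k) 0 = PySem.List.pyGetD xs (col + k) 0) →
    girlScan col N ys r = girlScan col N xs r := by
  intro n
  induction n with
  | zero =>
    intro r xs ys hn hread
    have hr : col - (r + 1) < 0 := by omega
    conv_lhs => rw [girlScan]
    conv_rhs => rw [girlScan]
    rw [dif_neg (by intro hc; exact absurd hc.1 (by omega)),
        dif_neg (by intro hc; exact absurd hc.1 (by omega))]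
  | succ n ih =>
    intro r xs ys hn hread
    conv_lhs => rw [girlScan]
    conv_rhs => rw [girlScan]
    by_cases hg : 0 ≤ col - (r + 1) ∧ col + (r + 1) < N
    · have he := hread (r + 1) (by omega) hg.1 hg.2
      by_cases heq : PySem.List.pyGetD xs (col - (r + 1)) 0 = PySem.List.pyGetD xs (col + (r + 1)) 0
      · rw [dif_pos ⟨hg.1, hg.2, by rw [he.1, he.2]; exact heq⟩,
            dif_pos ⟨hg.1, hg.2, heq⟩]
        exact ih (r + 1) xs ys (by omega) (fun k hk => hread k (by omega))
      · rw [dif_neg (by intro hc; exact heq (by rw [← he.1, ← he.2]; exact hc.2.2)),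
            dif_neg (by intro hc; exact heq hc.2.2)]
    · rw [dif_neg (by intro hc; exact hg ⟨hc.1, hc.2.1⟩),
          dif_neg (by intro hc; exact hg ⟨hc.1, hc.2.1⟩)]

theorem girlLoop_main (col N : Int) : ∀ (n : Nat) (i : Int) (xs : List Int),
    1 ≤ i → 0 ≤ col → N = (xs.length : Int) → (col + 1 - i).toNat ≤ n →
    girlLoop col N i xs =
      (PySem.List.pyRange i (girlScan col N xs (i - 1) + 1) 1).foldl (girlStep col) xs := by
  intro n
  induction n with
  | zero =>
    intro i xs hi hcol hN hn
    rw [girlLoop]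
    rw [dif_neg (by intro hc; omega)]
    rw [girlScan]
    rw [show i - 1 + 1 = i from by ring]
    rw [dif_neg (by intro hc; omega)]
    rw [show i - 1 + 1 = i from by ring, PySem.List.pyRange_one_eq_nil le_rfl]
    rfl
  | succ n ih =>
    intro i xs hi hcol hN hn
    rw [girlLoop]
    by_cases hc : 0 ≤ col - i ∧ col + i < N ∧
        PySem.List.pyGetD xs (col - i) 0 = PySem.List.pyGetD xs (col + i) 0
    · rw [dif_pos hc]
      set xs2 := PySem.List.pySetD
          (PySem.List.pySetD xs (col - i) (pynot (PySem.List.pyGetD xs (col - i) 0)))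
          (col + i)
          (pynot (PySem.List.pyGetD
            (PySem.List.pySetD xs (col - i) (pynot (PySem.List.pyGetD xs (col - i) 0)))
            (col + i) 0)) with hxs2
      have hlen : (xs2.length : Int) = (xs.length : Int) := by
        simp [hxs2, PySem.List.length_pySetD]
      have hrec := ih (i + 1) xs2 (by omega) hcol (by omega) (by omega)
      rw [show i + 1 - 1 = i from by ring] at hrec
      have hscan : girlScan col N xs2 i = girlScan col N xs i := by
        apply girlScan_congr col N ((col - i).toNat) i xs xs2 le_rfl
        intro k hk hk1 hk2
        constructor
        · rw [hxs2, pyGetD_set_ne _ _ _ _ _ (by omega) (by omega) (by omega),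
              pyGetD_set_ne _ _ _ _ _ (by omega) (by omega) (by omega)]
        · rw [hxs2, pyGetD_set_ne _ _ _ _ _ (by omega) (by omega) (by omega),
              pyGetD_set_ne _ _ _ _ _ (by omega) (by omega) (by omega)]
      have hstep1 : girlScan col N xs (i - 1) = girlScan col N xs i := by
        rw [girlScan]
        rw [show i - 1 + 1 = i from by ring]
        rw [dif_pos hc]
      have hge : i ≤ girlScan col N xs i :=
        girlScan_ge col N ((col - i).toNat) i xs le_rfl
      conv_rhs => rw [hstep1, PySem.List.pyRange_one_cons (show i < girlScan col N xs i + 1 from by omega)]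
      rw [hrec, hscan]
      simp only [List.foldl_cons]
      rfl
    · rw [dif_neg hc]
      rw [girlScan]
      rw [show i - 1 + 1 = i from by ring]
      rw [dif_neg hc]
      rw [show i - 1 + 1 = i from by ring, PySem.List.pyRange_one_eq_nil le_rfl]
      rfl

-- flipPal characterised by prefixLen
theorem flipPal_eq : ∀ (l r : List Int),
    flipPal l r = ((l.take (prefixLen l r)).map pynot ++ l.drop (prefixLen l r),
                   (r.take (prefixLen l r)).map pynot ++ r.drop (prefixLen l r)) := by
  intro l
  induction l with
  | nil => intro r; cases r <;> simp [flipPal, prefixLen]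
  | cons a l ih =>
    intro r
    cases r with
    | nil => simp [flipPal, prefixLen]
    | cons b r =>
      by_cases h : a = b
      · simp [flipPal, prefixLen, h, ih r]
      · simp [flipPal, prefixLen, h]

theorem prefixLen_le_left : ∀ (l r : List Int), prefixLen l r ≤ l.length := by
  intro l
  induction l with
  | nil => intro r; cases r <;> simp [prefixLen]
  | cons a l ih =>
    intro r
    cases r with
    | nil => simp [prefixLen]
    | cons b r =>
      by_cases h : a = b <;> simp [prefixLen, h]
      exact ih r

theorem prefixLen_le_right : ∀ (l r : List Int), prefixLen l r ≤ r.length := by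
  intro l
  induction l with
  | nil => intro r; cases r <;> simp [prefixLen]
  | cons a l ih =>
    intro r
    cases r with
    | nil => simp [prefixLen]
    | cons b r =>
      by_cases h : a = b <;> simp [prefixLen, h]
      · exact ih r

theorem prefixLen_nil_left (r : List Int) : prefixLen [] r = 0 := by
  cases r <;> simp [prefixLen]

theorem prefixLen_nil_right (l : List Int) : prefixLen l [] = 0 := by
  cases l <;> simp [prefixLen]

theorem girlScan_aux (col N : Int) (xs : List Int) (c : Nat)
    (hc : (c : Int) = col) (hN : N = (xs.length : Int)) (hlt : c < xs.length) :
    ∀ (n r : Nat), c - r ≤ n →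
      girlScan col N xs (r : Int) =
        ((r + prefixLen (((xs.take c).reverse).drop r) ((xs.drop (c + 1)).drop r) : Nat) : Int) := by
  have hL : ((xs.take c).reverse).length = c := by
    simp; omega
  have hR : (xs.drop (c + 1)).length = xs.length - (c + 1) := by simp
  intro n
  induction n with
  | zero =>
    intro r hn
    have hrc : c ≤ r := by omega
    rw [girlScan, dif_neg (by intro hcond; omega)]
    rw [List.drop_eq_nil_of_le (by omega), prefixLen_nil_left]
    omega
  | succ n ih =>
    intro r hn
    by_cases hb : r < c ∧ c + r + 1 < xs.length
    · -- both neighbours exist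
      have hbl : r < ((xs.take c).reverse).length := by omega
      have hbr : r < (xs.drop (c + 1)).length := by omega
      have eL : ((xs.take c).reverse)[r]'hbl = xs[c - 1 - r]'(by omega) := by
        rw [List.getElem_reverse, List.getElem_take]
        congr 1
        simp
        omega
      have eR : (xs.drop (c + 1))[r]'hbr = xs[c + 1 + r]'(by omega) := by
        rw [List.getElem_drop]
      have e1 : PySem.List.pyGetD xs (col - ((r : Int) + 1)) 0 = xs[c - 1 - r]'(by omega) := by
        rw [pyGetD_toNat _ _ _ (by omega)]
        rw [show (col - ((r : Int) + 1)).toNat = c - 1 - r from by omega]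
        exact List.getD_eq_getElem xs 0 (by omega)
      have e2 : PySem.List.pyGetD xs (col + ((r : Int) + 1)) 0 = xs[c + 1 + r]'(by omega) := by
        rw [pyGetD_toNat _ _ _ (by omega)]
        rw [show (col + ((r : Int) + 1)).toNat = c + 1 + r from by omega]
        exact List.getD_eq_getElem xs 0 (by omega)
      have hdl : ((xs.take c).reverse).drop r =
          ((xs.take c).reverse)[r]'hbl :: ((xs.take c).reverse).drop (r + 1) :=
        List.drop_eq_getElem_cons hbl
      have hdr : (xs.drop (c + 1)).drop r =
          (xs.drop (c + 1))[r]'hbr :: (xs.drop (c + 1)).drop (r + 1) :=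
        List.drop_eq_getElem_cons hbr
      by_cases heq : xs[c - 1 - r]'(by omega) = xs[c + 1 + r]'(by omega)
      · rw [girlScan, dif_pos ⟨by omega, by omega, by rw [e1, e2]; exact heq⟩]
        have := ih (r + 1) (by omega)
        rw [show (r : Int) + 1 = ((r + 1 : Nat) : Int) from by push_cast; ring, this]
        rw [hdl, hdr]
        rw [show prefixLen
              ((((xs.take c).reverse)[r]'hbl) :: ((xs.take c).reverse).drop (r + 1))
              (((xs.drop (c + 1))[r]'hbr) :: (xs.drop (c + 1)).drop (r + 1)) =
            prefixLen (((xs.take c).reverse).drop (r + 1)) ((xs.drop (c + 1)).drop (r + 1)) + 1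
          from by simp [prefixLen, eL, eR, heq]]
        push_cast
        ring
      · rw [girlScan, dif_neg (by
          intro hcond
          exact heq (by rw [← e1, ← e2]; exact hcond.2.2))]
        rw [hdl, hdr]
        rw [show prefixLen
              ((((xs.take c).reverse)[r]'hbl) :: ((xs.take c).reverse).drop (r + 1))
              (((xs.drop (c + 1))[r]'hbr) :: (xs.drop (c + 1)).drop (r + 1)) = 0
          from by simp [prefixLen, eL, eR, heq]]
        omega
    · -- a boundary is hit: both sides stop
      rw [girlScan, dif_neg (by intro hcond; omega)]
      rcases Nat.lt_or_ge r c with h1 | h1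
      · have : (xs.drop (c + 1)).drop r = [] := List.drop_eq_nil_of_le (by omega)
        rw [this, prefixLen_nil_right]
        omega
      · have : ((xs.take c).reverse).drop r = [] := List.drop_eq_nil_of_le (by omega)
        rw [this, prefixLen_nil_left]
        omega

-- girlScan equals the common-prefix length of the two neighbourhood lists
theorem girlScan_eq_prefixLen (col N : Int) (xs : List Int) (c : Nat)
    (hc : (c : Int) = col) (hN : N = (xs.length : Int)) (hlt : c < xs.length) :
    girlScan col N xs 0 = (prefixLen ((xs.take c).reverse) (xs.drop (c + 1)) : Int) := by
  have := girlScan_aux col N xs c hc hN hlt c 0 (by omega)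
  simpa using this

theorem getD_set_lt (l : List Int) (a j : Nat) (v : Int) (ha : a < l.length) :
    (l.set a v).getD j 0 = if j = a then v else l.getD j 0 := by
  simp only [List.getD, List.getElem?_set]
  by_cases h : j = a
  · subst h; simp [ha]
  · have h' : a ≠ j := fun hh => h hh.symm
    simp [h', h]

-- elementwise characterisation of the foldl of girlStep over 1..k
theorem foldl_girlStep_char (col : Int) (c : Nat) (hc : (c : Int) = col) :
    ∀ (k : Nat) (xs : List Int), k ≤ c → c + k < xs.length →
    (((PySem.List.pyRange 1 ((k : Int) + 1) 1).foldl (girlStep col) xs).length = xs.length ∧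
     ∀ j : Nat, j < xs.length →
       ((PySem.List.pyRange 1 ((k : Int) + 1) 1).foldl (girlStep col) xs).getD j 0 =
         if (j < c ∧ c ≤ j + k) ∨ (c < j ∧ j ≤ c + k) then pynot (xs.getD j 0)
         else xs.getD j 0) := by
  intro k
  induction k with
  | zero =>
    intro xs hk hlen
    rw [show ((0 : Nat) : Int) + 1 = 1 from by norm_num, PySem.List.pyRange_one_eq_nil le_rfl]
    refine ⟨rfl, ?_⟩
    intro j hj
    simp only [List.foldl_nil]
    rw [if_neg (by omega)]
  | succ k ih =>
    intro xs hk hlen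
    obtain ⟨ihlen, ihget⟩ := ih xs (by omega) (by omega)
    have hsplit : PySem.List.pyRange 1 (((k + 1 : Nat) : Int) + 1) 1 =
        PySem.List.pyRange 1 ((k : Int) + 1) 1 ++ [(k : Int) + 1] := by
      rw [show ((k + 1 : Nat) : Int) + 1 = ((k : Int) + 1) + 1 from by push_cast; ring]
      exact PySem.List.pyRange_one_succ_right (by omega)
    rw [hsplit, List.foldl_append]
    set F := (PySem.List.pyRange 1 ((k : Int) + 1) 1).foldl (girlStep col) xs with hF
    simp only [List.foldl_cons, List.foldl_nil]
    -- the step toggles positions c-(k+1) and c+(k+1)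
    have hd1 : col - ((k : Int) + 1) = ((c - (k + 1) : Nat) : Int) := by omega
    have hd2 : col + ((k : Int) + 1) = ((c + (k + 1) : Nat) : Int) := by omega
    have hv1 : PySem.List.pyGetD F (col - ((k : Int) + 1)) 0 = F.getD (c - (k + 1)) 0 := by
      rw [pyGetD_toNat _ _ _ (by omega)]
      congr 1
      omega
    have hv1x : F.getD (c - (k + 1)) 0 = xs.getD (c - (k + 1)) 0 := by
      rw [ihget (c - (k + 1)) (by omega), if_neg (by omega)]
    have hstep : girlStep col F ((k : Int) + 1) =
        (F.set (c - (k + 1)) (pynot (xs.getD (c - (k + 1)) 0))).set (c + (k + 1))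
          (pynot (xs.getD (c + (k + 1)) 0)) := by
      unfold girlStep
      dsimp only
      rw [hv1, hv1x]
      have h2 : PySem.List.pyGetD
          (PySem.List.pySetD F (col - ((k : Int) + 1)) (pynot (xs.getD (c - (k + 1)) 0)))
          (col + ((k : Int) + 1)) 0 = F.getD (c + (k + 1)) 0 := by
        rw [pyGetD_set_ne _ _ _ _ _ (by omega) (by omega) (by omega),
            pyGetD_toNat _ _ _ (by omega)]
        congr 1
        omega
      rw [h2]
      rw [ihget (c + (k + 1)) (by omega), if_neg (by omega)]
      rw [PySem.List.pySetD_of_nonneg _ _ (by omega), PySem.List.pySetD_of_nonneg _ _ (by omega),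
          show (col - ((k : Int) + 1)).toNat = c - (k + 1) from by omega,
          show (col + ((k : Int) + 1)).toNat = c + (k + 1) from by omega]
    rw [hstep]
    have hlF : F.length = xs.length := ihlen
    refine ⟨by simp [hlF], ?_⟩
    intro j hj
    rw [getD_set_lt _ _ _ _ (by simp [hlF]; omega),
        getD_set_lt _ _ _ _ (by rw [hlF]; omega)]
    by_cases h1 : j = c + (k + 1)
    · rw [if_pos h1, if_pos (by omega)]
      congr 1
      rw [h1]
    · rw [if_neg h1]
      by_cases h2 : j = c - (k + 1)
      · rw [if_pos h2, if_pos (by omega)]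
        congr 1
        rw [h2]
      · rw [if_neg h2, ihget j hj]
        by_cases hb : (j < c ∧ c ≤ j + k) ∨ (c < j ∧ j ≤ c + k)
        · rw [if_pos hb, if_pos (by omega)]
        · rw [if_neg hb, if_neg (by omega)]

theorem getD_append (l1 l2 : List Int) (j : Nat) :
    (l1 ++ l2).getD j 0 = if j < l1.length then l1.getD j 0 else l2.getD (j - l1.length) 0 := by
  by_cases h : j < l1.length
  · simp [List.getD, List.getElem?_append_left h, h]
  · simp [List.getD, List.getElem?_append_right (show l1.length ≤ j from by omega), h]

theorem getD_take (l : List Int) (n j : Nat) (h : j < n) :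
    (l.take n).getD j 0 = l.getD j 0 := by
  simp [List.getD, h]

theorem getD_drop (l : List Int) (n j : Nat) :
    (l.drop n).getD j 0 = l.getD (n + j) 0 := by
  simp [List.getD, List.getElem?_drop]

theorem getD_reverse (l : List Int) (j : Nat) (h : j < l.length) :
    l.reverse.getD j 0 = l.getD (l.length - 1 - j) 0 := by
  rw [List.getD_eq_getElem _ 0 (by simpa), List.getElem_reverse,
      List.getD_eq_getElem _ 0 (by omega)]

theorem getD_map_pynot (l : List Int) (j : Nat) (h : j < l.length) :
    (l.map pynot).getD j 0 = pynot (l.getD j 0) := by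
  rw [List.getD_eq_getElem _ 0 (by simpa), List.getElem_map, List.getD_eq_getElem _ 0 h]

-- proof-only helper: B's spliced result, written out
def bsideList (sl : List Int) (c k : Nat) : List Int :=
  ((((sl.take c).reverse.take k).map pynot ++ (sl.take c).reverse.drop k).reverse ++
      sl.drop c).take (c + 1) ++
    ((((sl.drop (c + 1)).take k).map pynot) ++ (sl.drop (c + 1)).drop k)

-- elementwise characterisation of B's spliced result
theorem bside_char (sl : List Int) (c k : Nat) (hcl : c < sl.length) (hkc : k ≤ c)
    (hkr : c + k < sl.length) :
    (bsideList sl c k).length = sl.length ∧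
    (∀ j : Nat, j < sl.length →
      (bsideList sl c k).getD j 0 =
        if (j < c ∧ c ≤ j + k) ∨ (c < j ∧ j ≤ c + k) then pynot (sl.getD j 0)
        else sl.getD j 0) := by
  unfold bsideList
  set L := (sl.take c).reverse with hLdef
  set Rt := sl.drop (c + 1) with hRdef
  set nl := (L.take k).map pynot ++ L.drop k with hnldef
  set nr := (Rt.take k).map pynot ++ Rt.drop k with hnrdef
  have hL : L.length = c := by simp [hLdef]; omega
  have hR : Rt.length = sl.length - (c + 1) := by simp [hRdef]
  have hnl : nl.length = c := by simp [hnldef]; omega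
  have hnr : nr.length = sl.length - (c + 1) := by simp [hnrdef, hR]; omega
  have hsl2 : (nl.reverse ++ sl.drop c).length = sl.length := by simp [hnl]; omega
  have htk : ((nl.reverse ++ sl.drop c).take (c + 1)).length = c + 1 := by
    simp [hsl2]; omega
  constructor
  · simp only [List.length_append, htk, hnr]; omega
  · intro j hj
    rw [getD_append, htk]
    by_cases hj1 : j < c + 1
    · rw [if_pos hj1, getD_take _ _ _ hj1, getD_append]
      by_cases hj2 : j < nl.reverse.length
      · -- j strictly left of the center
        have hjc : j < c := by simpa [hnl] using hj2
        rw [if_pos hj2, getD_reverse _ _ (by simpa [hnl] using hjc), hnl]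
        rw [getD_append]
        have hlt : ((L.take k).map pynot).length = k := by simp [hL]; omega
        rw [hlt]
        have hLj : L.getD (c - 1 - j) 0 = sl.getD j 0 := by
          rw [hLdef, getD_reverse _ _ (by simp; omega)]
          rw [show (sl.take c).length - 1 - (c - 1 - j) = j from by simp; omega]
          exact getD_take _ _ _ hjc
        by_cases hk2 : c - 1 - j < k
        · rw [if_pos hk2]
          rw [getD_map_pynot _ _ (by simp [hL]; omega), getD_take _ _ _ hk2, hLj]
          rw [if_pos (by omega)]
        · rw [if_neg hk2]
          rw [getD_drop, show k + (c - 1 - j - k) = c - 1 - j from by omega, hLj]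
          rw [if_neg (by omega)]
      · -- j is the center
        have hjc : j = c := by simp [hnl] at hj2; omega
        rw [if_neg hj2, getD_drop]
        rw [show c + (j - nl.reverse.length) = j from by simp [hnl]; omega]
        rw [if_neg (by omega)]
    · -- j right of the center
      rw [if_neg hj1, getD_append]
      have hlt : ((Rt.take k).map pynot).length = k := by simp [hR]; omega
      rw [hlt]
      have hRj : Rt.getD (j - (c + 1)) 0 = sl.getD j 0 := by
        rw [hRdef, getD_drop, show c + 1 + (j - (c + 1)) = j from by omega]
      by_cases hk2 : j - (c + 1) < k
      · rw [if_pos hk2, getD_map_pynot _ _ (by simp [hR]; omega), getD_take _ _ _ hk2, hRj]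
        rw [if_pos (by omega)]
      · rw [if_neg hk2, getD_drop, show k + (j - (c + 1) - k) = j - (c + 1) from by omega, hRj]
        rw [if_neg (by omega)]

theorem girl_eq (student switch_list : List Int) (hpre : Pre_girl student switch_list) :
    girl student switch_list = girl_alt student switch_list := by
  obtain ⟨hs, hlo, hhi⟩ := hpre
  simp only [girl, girl_alt]
  set col : Int := PySem.List.pyGetD student 1 0 - 1 with hcol
  set N : Int := (switch_list.length : Int) with hN
  set sl := PySem.List.pySetD switch_list col (pynot (PySem.List.pyGetD switch_list col 0)) with hsl
  by_cases hneg0 : col < 0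
  · -- negative center: A's loop guard fails at once, B skips the splice
    rw [girlLoop, dif_neg (by intro hc; exact absurd hc.1 (by omega))]
    rw [if_neg (by omega)]
  · have hneg : 0 ≤ col := by omega
    rw [if_pos hneg]
    have hslen : (sl.length : Int) = N := by
      simp [hsl, PySem.List.length_pySetD, hN]
    -- first iteration of A's loop double-toggles the center back
    have h0 : girlLoop col N 0 sl = girlLoop col N 1 sl := by
      rw [girlLoop]
      rw [dif_pos (by refine ⟨by omega, by omega, ?_⟩; rw [show col - 0 = col from by ring, show col + 0 = col from by ring])]
      dsimp only
      rw [show col - 0 = col from by ring, show col + 0 = col from by ring,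
          show (0 : Int) + 1 = 1 from by ring]
      have hv : PySem.List.pyGetD sl col 0 = pynot (PySem.List.pyGetD switch_list col 0) := by
        rw [hsl]; exact pyGetD_set_self _ _ _ _ hneg (by omega)
      rw [hv]
      have hv2 : PySem.List.pyGetD (PySem.List.pySetD sl col (pynot (pynot (PySem.List.pyGetD switch_list col 0)))) col 0
          = pynot (pynot (PySem.List.pyGetD switch_list col 0)) := by
        apply pyGetD_set_self _ _ _ _ hneg (by omega)
      rw [hv2, pynot3, hsl]
      rw [PySem.List.pySetD_of_nonneg _ _ hneg, PySem.List.pySetD_of_nonneg _ _ hneg,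
          PySem.List.pySetD_of_nonneg _ _ hneg, List.set_set, List.set_set]
    set c := col.toNat with hcdef
    have hcc : (c : Int) = col := by omega
    have hclen : c < sl.length := by omega
    have hmain := girlLoop_main col N (col.toNat) 1 sl le_rfl hneg (by omega) (by omega)
    rw [show (1 : Int) - 1 = 0 from by ring] at hmain
    set k := prefixLen ((sl.take c).reverse) (sl.drop (c + 1)) with hkdef
    have hscan : girlScan col N sl 0 = (k : Int) :=
      girlScan_eq_prefixLen col N sl c hcc (by omega) hclen
    have hkc : k ≤ c := by
      have := prefixLen_le_left ((sl.take c).reverse) (sl.drop (c + 1))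
      simp at this
      omega
    have hkr : c + k < sl.length := by
      have := prefixLen_le_right ((sl.take c).reverse) (sl.drop (c + 1))
      simp at this
      omega
    obtain ⟨haL, haG⟩ := foldl_girlStep_char col c hcc k sl hkc hkr
    obtain ⟨hbL, hbG⟩ := bside_char sl c k hclen hkc hkr
    -- rewrite B's slices to take/drop and its flipPal by its characterisation
    rw [PySem.List.slice_to sl hneg, PySem.List.slice_from sl (show (0 : Int) ≤ col + 1 from by omega),
        PySem.List.slice_from sl hneg,
        show (col + 1).toNat = c + 1 from by omega,
        show col.toNat = c from rfl,
        flipPal_eq ((sl.take c).reverse) (sl.drop (c + 1)),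
        PySem.List.slice_to _ (show (0 : Int) ≤ col + 1 from by omega),
        show (col + 1).toNat = c + 1 from by omega]
    rw [h0, hmain, hscan]
    show _ = bsideList sl c k
    apply List.ext_getElem (by rw [haL, hbL])
    intro i h1 h2
    rw [← List.getD_eq_getElem _ 0 h1, ← List.getD_eq_getElem _ 0 h2,
        haG i (by rwa [haL] at h1), hbG i (by rwa [hbL] at h2)]

-- ===== VERDICT (by name: the statement is the Claim_ definition above) =====
theorem girl_spec : Claim_equal_girl := by
  intro student switch_list _ hpre
  unfold Spec_girl
  exact girl_eq student switch_list hpre
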